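-- pv_equiv track=rewrite | github.com/MatiPl01/Wstep-do-Informatyki | Ćwiczenia/4. Zajęcia/Zadanie8/Program2.py | longest_diagonal_geometric_subsequence
-- ===== SOURCE A (Python) =====
-- def longest_diagonal_geometric_subsequence(matrix: list) -> int:
--     """Returns length of the longest geometric sequence found in the matrix (0 if not found; 2-element
--     sequences aren't counted). Sequence is searched diagonally from the top-left corner to the bottom-right corner."""
--     max_length = 2
--
--     def search_sequence(row_idx, col_idx):
--         curr_max_length = curr_length = 2
--
--         for _ in range(min(len(matrix)-row_idx-2, len(matrix)-col_idx-2)):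
--             if matrix[row_idx][col_idx] ** 2 == matrix[row_idx-1][col_idx-1] * matrix[row_idx+1][col_idx+1]:
--                 curr_length += 1
--                 if curr_length > curr_max_length:
--                     curr_max_length = curr_length
--             else:
--                 curr_length = 2
--             row_idx += 1
--             col_idx += 1
--
--         return curr_max_length
--
--     for start_idx in range(1, len(matrix)-1):
--         curr_length = max(search_sequence(1, start_idx), search_sequence(start_idx, 1))
--         if curr_length > max_length:
--             max_length = curr_length
--
--     return max_length if max_length > 2 else 0
-- ===== SOURCE B (Python) =====
-- def longest_diagonal_geometric_subsequence(matrix: list) -> int: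
--     """Returns length of the longest geometric sequence found in the matrix (0 if not found; 2-element
--     sequences aren't counted). Sequence is searched diagonally from the top-left corner to the bottom-right corner."""
--     n = len(matrix)
--     best = 0
--     prev = {}  # column -> length of the geometric-test run ending on the previous row
--     for i in range(1, n - 2):
--         curr = {}
--         for j in range(1, n - 2):
--             if matrix[i][j] ** 2 == matrix[i - 1][j - 1] * matrix[i + 1][j + 1]:
--                 curr[j] = prev.get(j - 1, 0) + 1
--                 if curr[j] > best:
--                     best = curr[j]
--         prev = curr
--     return best + 2 if best > 0 else 0
-- ===== Notes on version B (the rewrite author's own statement) =====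
-- stated objective: alternative
-- what changed: A scans each diagonal with a streaming run counter restarted from every start cell (two nested search passes per diagonal offset); B is a row-major dynamic program over the matrix that carries, in a dictionary keyed by column, the length of the geometric-test run ending on the previous row, so no diagonal is ever walked explicitly.
import Mathlib
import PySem

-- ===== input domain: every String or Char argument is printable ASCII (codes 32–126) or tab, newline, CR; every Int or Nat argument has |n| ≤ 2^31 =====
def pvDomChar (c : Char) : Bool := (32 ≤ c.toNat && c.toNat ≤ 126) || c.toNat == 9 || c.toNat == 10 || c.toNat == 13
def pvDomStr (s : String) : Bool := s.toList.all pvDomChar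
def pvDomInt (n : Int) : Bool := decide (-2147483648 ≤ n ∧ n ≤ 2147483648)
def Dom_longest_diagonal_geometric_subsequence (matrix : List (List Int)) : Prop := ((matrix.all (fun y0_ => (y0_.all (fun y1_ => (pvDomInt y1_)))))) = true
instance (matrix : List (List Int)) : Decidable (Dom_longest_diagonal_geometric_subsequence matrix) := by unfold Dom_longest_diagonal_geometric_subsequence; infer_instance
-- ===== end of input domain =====

-- B replaces A's per-diagonal streaming run scans by a row-major dynamic program that
-- carries run lengths in a column-keyed dictionary (objective: alternative algorithm).

-- ===== PORT A =====
-- matrix[r][c] (indices are always in range under Pre_; out of range Python raises, the port returns the default)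
def pvCell (matrix : List (List Int)) (r c : Int) : Int :=
  PySem.List.pyGetD (PySem.List.pyGetD matrix r []) c 0

-- body of A's inner `for _ in range(...)` loop; state = (curr_max_length, curr_length, row_idx, col_idx)
def pvSearchStep (matrix : List (List Int)) (st : Int × Int × Int × Int) (_ : Int) :
    Int × Int × Int × Int :=
  let (cm, cl, ri, ci) := st
  if pvCell matrix ri ci ^ 2 = pvCell matrix (ri - 1) (ci - 1) * pvCell matrix (ri + 1) (ci + 1) then
    let cl' := cl + 1
    ((if cl' > cm then cl' else cm), cl', ri + 1, ci + 1)
  else (cm, 2, ri + 1, ci + 1)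

-- A's nested search_sequence(row_idx, col_idx)
def pvSearchSeq (matrix : List (List Int)) (row_idx col_idx : Int) : Int :=
  ((PySem.List.pyRange 0
      (min ((matrix.length : Int) - row_idx - 2) ((matrix.length : Int) - col_idx - 2))).foldl
    (pvSearchStep matrix) (2, 2, row_idx, col_idx)).1

-- `return max_length if max_length > 2 else 0`
def pvRet (x : Int) : Int := if x > 2 then x else 0

def longest_diagonal_geometric_subsequence (matrix : List (List Int)) : Int :=
  pvRet ((PySem.List.pyRange 1 ((matrix.length : Int) - 1)).foldl
    (fun ml s =>
      let cur := max (pvSearchSeq matrix 1 s) (pvSearchSeq matrix s 1)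
      if cur > ml then cur else ml) 2)

-- ===== PORT B =====
-- matrix[i][j] on B's side (same Python indexing, ported independently of A's helper)
def pvCellB (matrix : List (List Int)) (r c : Int) : Int :=
  PySem.List.pyGetD (PySem.List.pyGetD matrix r []) c 0

-- body of B's inner `for j in range(1, n - 2)` loop; state = (best, curr)
def pvInnerStep (matrix : List (List Int)) (prev : PySem.Dict Int Int) (i : Int)
    (st : Int × PySem.Dict Int Int) (j : Int) : Int × PySem.Dict Int Int :=
  let (best, curr) := st
  if pvCellB matrix i j ^ 2 = pvCellB matrix (i - 1) (j - 1) * pvCellB matrix (i + 1) (j + 1) then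
    let v := prev.getD (j - 1) 0 + 1
    ((if v > best then v else best), curr.insert j v)
  else st

-- body of B's outer `for i in range(1, n - 2)` loop; state = (best, prev)
def pvRowStep (matrix : List (List Int)) (st : Int × PySem.Dict Int Int) (i : Int) :
    Int × PySem.Dict Int Int :=
  (PySem.List.pyRange 1 ((matrix.length : Int) - 2)).foldl
    (pvInnerStep matrix st.2 i) (st.1, PySem.Dict.empty)

def longest_diagonal_geometric_subsequence_alt (matrix : List (List Int)) : Int :=
  let res := (PySem.List.pyRange 1 ((matrix.length : Int) - 2)).foldl
    (pvRowStep matrix) (0, (PySem.Dict.empty : PySem.Dict Int Int))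
  if res.1 > 0 then res.1 + 2 else 0

-- ===== PRECONDITION & SPEC =====
-- Pre_ requires exactly the cells both Pythons read (positions (i,j) with i,j ≤ n-2 and
-- |i-j| ≤ n-4) to exist; on ragged matrices missing one of them BOTH Pythons raise
-- IndexError (they read the same cell set), so Pre_ is exactly where A returns.
def Pre_longest_diagonal_geometric_subsequence (matrix : List (List Int)) : Prop :=
  ∀ i ∈ List.range matrix.length, ∀ j ∈ List.range matrix.length,
    i + 1 < matrix.length → j + 1 < matrix.length →
    (i : Int) ≤ (j : Int) + ((matrix.length : Int) - 4) →
    (j : Int) ≤ (i : Int) + ((matrix.length : Int) - 4) →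
    j < (matrix.getD i []).length

instance (matrix : List (List Int)) : Decidable (Pre_longest_diagonal_geometric_subsequence matrix) := by
  unfold Pre_longest_diagonal_geometric_subsequence; infer_instance

def pvWitness_longest_diagonal_geometric_subsequence : List (List Int) :=
  [[1, 2, 4, 1], [3, 2, 4, 8], [1, 3, 4, 16], [5, 6, 7, 8]]

def Spec_longest_diagonal_geometric_subsequence (matrix : List (List Int)) (out : Int) : Prop := out = longest_diagonal_geometric_subsequence_alt matrix
instance (matrix : List (List Int)) (out : Int) : Decidable (Spec_longest_diagonal_geometric_subsequence matrix out) := by unfold Spec_longest_diagonal_geometric_subsequence; infer_instance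

-- ===== CLAIM (what is proved, stated in full; the proofs are below) =====
def Claim_equal_longest_diagonal_geometric_subsequence : Prop := ∀ (matrix : List (List Int)), Dom_longest_diagonal_geometric_subsequence matrix → Pre_longest_diagonal_geometric_subsequence matrix → Spec_longest_diagonal_geometric_subsequence matrix (longest_diagonal_geometric_subsequence matrix)

-- ===== LEMMAS AND PROOFS =====

-- the three-term geometric test centred at integer cell (r, c)
def pvTest (matrix : List (List Int)) (r c : Int) : Bool :=
  decide (pvCell matrix r c ^ 2 = pvCell matrix (r - 1) (c - 1) * pvCell matrix (r + 1) (c + 1))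

-- the run length of consecutive satisfied tests ending at centre (i, j), zero outside
-- the centre region 1 ≤ i, j ≤ n-3 (the common mathematical object of both programs)
def streak (matrix : List (List Int)) : Nat → Nat → Int
  | 0, _ => 0
  | _ + 1, 0 => 0
  | i + 1, j + 1 =>
    if ((i : Int) + 1 ≤ (matrix.length : Int) - 3 ∧ (j : Int) + 1 ≤ (matrix.length : Int) - 3)
        ∧ pvTest matrix ((i : Int) + 1) ((j : Int) + 1) = true then
      streak matrix i j + 1
    else 0

-- K = number of admissible rows (and columns) of centres
def pvK (matrix : List (List Int)) : Nat := ((matrix.length : Int) - 3).toNat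

-- the row-major maximum of all streaks (both programs compute pvRet (2 + this))
def pvR (matrix : List (List Int)) : Int :=
  (List.range (pvK matrix)).foldl
    (fun b i' => (List.range (pvK matrix)).foldl
      (fun a j' => max a (streak matrix (1 + i') (1 + j'))) b) 0

-- A-side abstraction: run scan over a list of test booleans
def sstep (s : Int × Int) (t : Bool) : Int × Int :=
  ((if t then s.1 + 1 else 0), max s.2 (if t then s.1 + 1 else 0))

def sfold (ts : List Bool) (p : Int × Int) : Int × Int := ts.foldl sstep p

def tstep (s : Int × Int) (t : Bool) : Int × Int :=
  if t then (s.1 + 1, if s.1 + 1 > s.2 then s.1 + 1 else s.2) else (2, s.2)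

def tscan (ts : List Bool) (s : Int × Int) : Int × Int := ts.foldl tstep s

def testsA (matrix : List (List Int)) (r c : Int) : List Bool :=
  (List.range (min ((matrix.length : Int) - r - 2) ((matrix.length : Int) - c - 2)).toNat).map
    (fun (j : Nat) => pvTest matrix (r + (j : Int)) (c + (j : Int)))

-- the `streak` value read through an Int column index (what B's dict stores)
def streakI (matrix : List (List Int)) (k : Nat) (j : Int) : Int :=
  if 0 ≤ j then streak matrix k j.toNat else 0

lemma if_gt_eq_max (x y : Int) : (if x > y then x else y) = max y x := by
  rcases max_cases y x with ⟨h1, h2⟩ | ⟨h1, h2⟩ <;> rw [h1] <;> split <;> omega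

-- generic bounds for `foldl`-style running maxima
lemma foldl_preserve {α : Type} (F : Int → α → Int) (c : Int) :
    ∀ (l : List α) (a : Int), a ≤ c → (∀ b x, b ≤ c → x ∈ l → F b x ≤ c) →
      l.foldl F a ≤ c := by
  intro l
  induction l with
  | nil => intro a ha _; simpa using ha
  | cons x l ih =>
    intro a ha h
    exact ih _ (h a x ha (List.mem_cons_self)) (fun b y hb hy => h b y hb (List.mem_cons_of_mem _ hy))

lemma le_foldl_incr {α : Type} (F : Int → α → Int) (hincr : ∀ b x, b ≤ F b x) :
    ∀ (l : List α) (a : Int), a ≤ l.foldl F a := by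
  intro l
  induction l with
  | nil => intro a; simp
  | cons x l ih => intro a; exact le_trans (hincr a x) (ih (F a x))

lemma mem_le_foldl {α : Type} (F : Int → α → Int) (hincr : ∀ b x, b ≤ F b x)
    (v : Int) (x : α) (hx : ∀ b, v ≤ F b x) :
    ∀ (l : List α) (a : Int), x ∈ l → v ≤ l.foldl F a := by
  intro l
  induction l with
  | nil => intro a h; cases h
  | cons y l ih =>
    intro a h
    rcases List.mem_cons.1 h with rfl | h
    · exact le_trans (hx a) (le_foldl_incr F hincr l _)
    · exact ih _ h

lemma streak_nonneg (matrix : List (List Int)) (i j : Nat) : 0 ≤ streak matrix i j := by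
  match i, j with
  | 0, _ => simp [streak]
  | _ + 1, 0 => simp [streak]
  | i + 1, j + 1 =>
    rw [streak]
    split
    · have := streak_nonneg matrix i j; omega
    · omega

lemma streak_zero_outside (matrix : List (List Int)) (i j : Nat)
    (h : ¬ (1 ≤ i ∧ (i : Int) ≤ (matrix.length : Int) - 3 ∧ 1 ≤ j ∧ (j : Int) ≤ (matrix.length : Int) - 3)) :
    streak matrix i j = 0 := by
  match i, j with
  | 0, _ => simp [streak]
  | _ + 1, 0 => simp [streak]
  | i + 1, j + 1 =>
    rw [streak]
    rw [if_neg]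
    intro ⟨⟨h1, h2⟩, _⟩
    exact h ⟨by omega, by push_cast; omega, by omega, by push_cast; omega⟩

-- every streak is at most pvR
lemma streak_le_R (matrix : List (List Int)) (i j : Nat) : streak matrix i j ≤ pvR matrix := by
  have h0 : (0 : Int) ≤ pvR matrix := by
    unfold pvR
    exact le_foldl_incr _ (fun b i' => le_foldl_incr _ (fun a j' => le_max_left _ _) _ b) _ 0
  by_cases hreg : 1 ≤ i ∧ (i : Int) ≤ (matrix.length : Int) - 3 ∧ 1 ≤ j ∧ (j : Int) ≤ (matrix.length : Int) - 3
  · obtain ⟨hi1, hi2, hj1, hj2⟩ := hreg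
    obtain ⟨i', rfl⟩ : ∃ i', i = 1 + i' := ⟨i - 1, by omega⟩
    obtain ⟨j', rfl⟩ : ∃ j', j = 1 + j' := ⟨j - 1, by omega⟩
    unfold pvR
    refine mem_le_foldl
      (F := fun b i'' => (List.range (pvK matrix)).foldl
        (fun a j'' => max a (streak matrix (1 + i'') (1 + j''))) b)
      (fun b i'' => le_foldl_incr _ (fun a j'' => le_max_left _ _) _ b)
      (streak matrix (1 + i') (1 + j')) i' (fun b => ?_) _ 0 ?_
    · refine mem_le_foldl
        (F := fun a j'' => max a (streak matrix (1 + i') (1 + j'')))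
        (fun a j'' => le_max_left _ _) _ j' (fun a => le_max_right _ _) _ b ?_
      refine List.mem_range.mpr ?_
      unfold pvK; omega
    · refine List.mem_range.mpr ?_
      unfold pvK; omega
  · rw [streak_zero_outside matrix i j hreg]; exact h0

lemma pvR_le (matrix : List (List Int)) (c : Int) (h0 : 0 ≤ c)
    (h : ∀ i' j' : Nat, streak matrix (1 + i') (1 + j') ≤ c) : pvR matrix ≤ c := by
  unfold pvR
  refine foldl_preserve _ c _ 0 h0 (fun b i' hb _ => ?_)
  exact foldl_preserve _ c _ b hb (fun a j' ha _ => by have := h i' j'; omega)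

-- ---- A side ----

lemma tscan_eq_sfold (ts : List Bool) : ∀ (s m : Int), 0 ≤ m →
    tscan ts (s + 2, m + 2) = ((sfold ts (s, m)).1 + 2, (sfold ts (s, m)).2 + 2) := by
  induction ts with
  | nil => intro s m _; simp [tscan, sfold]
  | cons t ts ih =>
    intro s m hm
    cases t with
    | false =>
      have h2 : max m (0 : Int) = m := by omega
      simpa [tscan, sfold, tstep, sstep, h2] using ih 0 m hm
    | true =>
      have hm' : 0 ≤ max m (s + 1) := by omega
      have ht : tstep (s + 2, m + 2) true = (s + 1 + 2, max m (s + 1) + 2) := by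
        show (s + 2 + 1, if s + 2 + 1 > m + 2 then s + 2 + 1 else m + 2) = _
        rw [if_gt_eq_max]
        refine Prod.ext (by ring) (by simp; omega)
      have hs : sstep (s, m) true = (s + 1, max m (s + 1)) := rfl
      show tscan ts (tstep (s + 2, m + 2) true) = ((sfold ts (sstep (s, m) true)).1 + 2, (sfold ts (sstep (s, m) true)).2 + 2)
      rw [ht, hs]
      exact ih (s + 1) (max m (s + 1)) hm'

lemma sfold_diag (matrix : List (List Int)) :
    ∀ (k : Nat) (r c : Nat) (m : Int), 1 ≤ r → 1 ≤ c →
    (∀ e : Nat, e < k → ((r : Int) + e ≤ (matrix.length : Int) - 3 ∧ (c : Int) + e ≤ (matrix.length : Int) - 3)) →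
    sfold ((List.range k).map (fun (e : Nat) => pvTest matrix ((r : Int) + e) ((c : Int) + e)))
      (streak matrix (r - 1) (c - 1), m)
    = (streak matrix (r + k - 1) (c + k - 1),
       (List.range k).foldl (fun a e => max a (streak matrix (r + e) (c + e))) m) := by
  intro k
  induction k with
  | zero => intro r c m _ _ _; simp [sfold]
  | succ k ih =>
    intro r c m hr hc hreg
    obtain ⟨r', rfl⟩ : ∃ r', r = r' + 1 := ⟨r - 1, by omega⟩
    obtain ⟨c', rfl⟩ : ∃ c', c = c' + 1 := ⟨c - 1, by omega⟩
    have hstep : sstep (streak matrix (r' + 1 - 1) (c' + 1 - 1), m)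
        (pvTest matrix (((r' + 1 : Nat) : Int) + (0 : Nat)) (((c' + 1 : Nat) : Int) + (0 : Nat)))
        = (streak matrix (r' + 1) (c' + 1), max m (streak matrix (r' + 1) (c' + 1))) := by
      have harg1 : (((r' + 1 : Nat) : Int) + ((0 : Nat) : Int)) = (r' : Int) + 1 := by push_cast; ring
      have harg2 : (((c' + 1 : Nat) : Int) + ((0 : Nat) : Int)) = (c' : Int) + 1 := by push_cast; ring
      have hr1 : ((r' : Int) + 1 ≤ (matrix.length : Int) - 3) := by
        have := (hreg 0 (by omega)).1; push_cast at this; omega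
      have hc1 : ((c' : Int) + 1 ≤ (matrix.length : Int) - 3) := by
        have := (hreg 0 (by omega)).2; push_cast at this; omega
      rw [harg1, harg2]
      cases ht : pvTest matrix ((r' : Int) + 1) ((c' : Int) + 1)
      · have hs0 : streak matrix (r' + 1) (c' + 1) = 0 := by
          rw [streak, if_neg (by simp [ht])]
        simp [sstep, hs0]
      · have hs1 : streak matrix (r' + 1) (c' + 1) = streak matrix r' c' + 1 := by
          rw [streak, if_pos ⟨⟨hr1, hc1⟩, ht⟩]
        simp [sstep, hs1]
    rw [List.range_succ_eq_map, List.map_cons]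
    show sfold _ (sstep _ _) = _
    rw [hstep, List.map_map]
    have hmap : ((List.range k).map
          ((fun (e : Nat) => pvTest matrix (((r' + 1 : Nat) : Int) + e) (((c' + 1 : Nat) : Int) + e)) ∘ Nat.succ))
        = (List.range k).map
          (fun (e : Nat) => pvTest matrix (((r' + 2 : Nat) : Int) + e) (((c' + 2 : Nat) : Int) + e)) := by
      refine List.map_congr_left (fun e _ => ?_)
      simp only [Function.comp_apply]
      congr 1 <;> push_cast <;> ring
    rw [hmap]
    have hih := ih (r' + 2) (c' + 2) (max m (streak matrix (r' + 1) (c' + 1))) (by omega) (by omega)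
      (fun e he => by
        have h1 := (hreg (e + 1) (by omega)).1
        have h2 := (hreg (e + 1) (by omega)).2
        constructor
        · push_cast at h1 ⊢; omega
        · push_cast at h2 ⊢; omega)
    simp only [show r' + 2 - 1 = r' + 1 from rfl, show c' + 2 - 1 = c' + 1 from rfl] at hih
    rw [hih]
    refine Prod.ext ?_ ?_
    · show streak matrix (r' + 2 + k - 1) (c' + 2 + k - 1)
        = streak matrix (r' + 1 + (k + 1) - 1) (c' + 1 + (k + 1) - 1)
      congr 1 <;> omega
    · simp only [List.foldl_cons, List.foldl_map, Nat.add_zero]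
      have hfun : (fun (x : Int) (y : Nat) => max x (streak matrix (r' + 1 + y.succ) (c' + 1 + y.succ)))
          = (fun (x : Int) (y : Nat) => max x (streak matrix (r' + 2 + y) (c' + 2 + y))) := by
        funext x y; congr 2 <;> omega
      rw [hfun]

-- A's inner loop is the tscan of the diagonal's test list
lemma foldA (matrix : List (List Int)) (k : Nat) : ∀ (r c cl cm : Int),
    (PySem.List.pyRange 0 (k : Int)).foldl (pvSearchStep matrix) (cm, cl, r, c)
    = ((tscan ((List.range k).map (fun (j : Nat) => pvTest matrix (r + (j:Int)) (c + (j:Int)))) (cl, cm)).2,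
       (tscan ((List.range k).map (fun (j : Nat) => pvTest matrix (r + (j:Int)) (c + (j:Int)))) (cl, cm)).1,
       r + k, c + k) := by
  induction k with
  | zero =>
    intro r c cl cm
    simp [tscan, PySem.List.pyRange_one_eq_nil (le_refl (0:Int))]
  | succ k ih =>
    intro r c cl cm
    have hcast : ((k + 1 : Nat) : Int) = (k : Int) + 1 := by push_cast; ring
    rw [hcast, PySem.List.pyRange_one_succ_right (by positivity), List.foldl_append, ih,
        List.range_succ, List.map_append]
    simp only [tscan, List.foldl_append, List.map_cons, List.map_nil, List.foldl_cons,
      List.foldl_nil, List.foldl_nil]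
    simp only [pvSearchStep, tstep, pvTest, decide_eq_true_eq]
    split_ifs <;> simp <;> constructor <;> omega

lemma searchA_eq (matrix : List (List Int)) (r c : Int) :
    pvSearchSeq matrix r c = (tscan (testsA matrix r c) (2, 2)).2 := by
  unfold pvSearchSeq testsA
  have h : PySem.List.pyRange 0 (min ((matrix.length : Int) - r - 2) ((matrix.length : Int) - c - 2))
      = PySem.List.pyRange 0 (((min ((matrix.length : Int) - r - 2) ((matrix.length : Int) - c - 2)).toNat : Int)) := by
    rw [PySem.List.pyRange_zero, PySem.List.pyRange_zero]
    congr 2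
  rw [h, foldA]

-- pvSearchSeq in terms of streak maxima
lemma searchSeq_eq (matrix : List (List Int)) (d : Nat)
    (hd : (d : Int) ≤ (matrix.length : Int) - 4) :
    pvSearchSeq matrix 1 (1 + (d : Int))
      = (List.range ((matrix.length : Int) - d - 3).toNat).foldl
          (fun a e => max a (streak matrix (1 + e) (1 + d + e))) 0 + 2 := by
  rw [searchA_eq]
  have hts : testsA matrix 1 (1 + (d : Int))
      = (List.range ((matrix.length : Int) - d - 3).toNat).map
          (fun (e : Nat) => pvTest matrix (((1 : Nat) : Int) + e) ((((1 + d : Nat)) : Int) + e)) := by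
    unfold testsA
    rw [show (min ((matrix.length : Int) - 1 - 2) ((matrix.length : Int) - (1 + (d : Int)) - 2)).toNat
        = ((matrix.length : Int) - d - 3).toNat from by omega]
    exact List.map_congr_left (fun e _ => by congr 1)
  have hsd := sfold_diag matrix ((matrix.length : Int) - d - 3).toNat 1 (1 + d) 0
    (by omega) (by omega)
    (fun e he => by constructor <;> push_cast <;> omega)
  have hd0 : streak matrix (1 - 1) (1 + d - 1) = 0 := by
    simp [streak]
  rw [hd0] at hsd
  have h2 := tscan_eq_sfold (testsA matrix 1 (1 + (d : Int))) 0 0 (le_refl 0)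
  norm_num at h2
  rw [h2, hts, hsd]

lemma searchSeq_eq' (matrix : List (List Int)) (d : Nat)
    (hd : (d : Int) ≤ (matrix.length : Int) - 4) :
    pvSearchSeq matrix (1 + (d : Int)) 1
      = (List.range ((matrix.length : Int) - d - 3).toNat).foldl
          (fun a e => max a (streak matrix (1 + d + e) (1 + e))) 0 + 2 := by
  rw [searchA_eq]
  have hts : testsA matrix (1 + (d : Int)) 1
      = (List.range ((matrix.length : Int) - d - 3).toNat).map
          (fun (e : Nat) => pvTest matrix ((((1 + d : Nat)) : Int) + e) (((1 : Nat) : Int) + e)) := by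
    unfold testsA
    rw [show (min ((matrix.length : Int) - (1 + (d : Int)) - 2) ((matrix.length : Int) - 1 - 2)).toNat
        = ((matrix.length : Int) - d - 3).toNat from by omega]
    exact List.map_congr_left (fun e _ => by congr 1)
  have hsd := sfold_diag matrix ((matrix.length : Int) - d - 3).toNat (1 + d) 1 0
    (by omega) (by omega)
    (fun e he => by constructor <;> push_cast <;> omega)
  have hd0 : streak matrix (1 + d - 1) (1 - 1) = 0 := by
    cases d with
    | zero => simp [streak]
    | succ d' => simp [streak]
  rw [hd0] at hsd
  have h2 := tscan_eq_sfold (testsA matrix (1 + (d : Int)) 1) 0 0 (le_refl 0)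
  norm_num at h2
  rw [h2, hts, hsd]

-- empty diagonals (d > n-4) give the baseline 2
lemma searchSeq_empty (matrix : List (List Int)) (d : Nat)
    (hd : ¬ (d : Int) ≤ (matrix.length : Int) - 4) :
    pvSearchSeq matrix 1 (1 + (d : Int)) = 2 ∧ pvSearchSeq matrix (1 + (d : Int)) 1 = 2 := by
  constructor <;>
  · unfold pvSearchSeq
    rw [PySem.List.pyRange_one_eq_nil (by omega)]
    simp

-- the value of A's outer loop
def pvAfold (matrix : List (List Int)) : Int :=
  (List.range (((matrix.length : Int) - 2).toNat)).foldl
    (fun ml (k : Nat) => max ml (max (pvSearchSeq matrix 1 (1 + (k : Int)))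
      (pvSearchSeq matrix (1 + (k : Int)) 1))) 2

lemma pvR_nonneg (matrix : List (List Int)) : (0 : Int) ≤ pvR matrix := by
  unfold pvR
  exact le_foldl_incr _ (fun b i' => le_foldl_incr _ (fun a j' => le_max_left _ _) _ b) _ 0

lemma A_eq_fold (matrix : List (List Int)) :
    longest_diagonal_geometric_subsequence matrix = pvRet (pvAfold matrix) := by
  unfold longest_diagonal_geometric_subsequence pvAfold
  apply congrArg pvRet
  rw [PySem.List.pyRange_one 1 ((matrix.length : Int) - 1), List.foldl_map]
  rw [show ((matrix.length : Int) - 1 - 1).toNat = ((matrix.length : Int) - 2).toNat from by omega]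
  have hfun : (fun (ml : Int) (k : Nat) =>
        let cur := max (pvSearchSeq matrix 1 (1 + (k : Int))) (pvSearchSeq matrix (1 + (k : Int)) 1)
        if cur > ml then cur else ml)
      = (fun (ml : Int) (k : Nat) => max ml (max (pvSearchSeq matrix 1 (1 + (k : Int)))
          (pvSearchSeq matrix (1 + (k : Int)) 1))) := by
    funext ml k
    exact if_gt_eq_max _ _
  rw [hfun]

-- each diagonal maximum is bounded by pvR, and conversely each streak is reached on its diagonal
lemma cur_le (matrix : List (List Int)) (k : Nat) :
    max (pvSearchSeq matrix 1 (1 + (k : Int))) (pvSearchSeq matrix (1 + (k : Int)) 1)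
      ≤ 2 + pvR matrix := by
  by_cases hd : (k : Int) ≤ (matrix.length : Int) - 4
  · rw [searchSeq_eq matrix k hd, searchSeq_eq' matrix k hd]
    have h1 : (List.range ((matrix.length : Int) - k - 3).toNat).foldl
        (fun a e => max a (streak matrix (1 + e) (1 + k + e))) 0 ≤ pvR matrix :=
      foldl_preserve _ _ _ 0 (pvR_nonneg matrix)
        (fun b e hb _ => by have := streak_le_R matrix (1 + e) (1 + k + e); omega)
    have h2 : (List.range ((matrix.length : Int) - k - 3).toNat).foldl
        (fun a e => max a (streak matrix (1 + k + e) (1 + e))) 0 ≤ pvR matrix :=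
      foldl_preserve _ _ _ 0 (pvR_nonneg matrix)
        (fun b e hb _ => by have := streak_le_R matrix (1 + k + e) (1 + e); omega)
    omega
  · rw [(searchSeq_empty matrix k hd).1, (searchSeq_empty matrix k hd).2]
    have := pvR_nonneg matrix; omega

lemma cur_le_Afold (matrix : List (List Int)) (k : Nat)
    (hk : k < ((matrix.length : Int) - 2).toNat) :
    max (pvSearchSeq matrix 1 (1 + (k : Int))) (pvSearchSeq matrix (1 + (k : Int)) 1)
      ≤ pvAfold matrix := by
  unfold pvAfold
  exact mem_le_foldl
    (F := fun b (x : Nat) => max b (max (pvSearchSeq matrix 1 (1 + (x : Int)))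
      (pvSearchSeq matrix (1 + (x : Int)) 1)))
    (fun b x => le_max_left _ _) _ k (fun b => le_max_right _ _) _ 2
    (List.mem_range.mpr hk)

lemma two_le_Afold (matrix : List (List Int)) : (2 : Int) ≤ pvAfold matrix := by
  unfold pvAfold
  exact le_foldl_incr _ (fun b x => le_max_left _ _) _ 2

lemma streak_le_Afold (matrix : List (List Int)) (i' j' : Nat) :
    streak matrix (1 + i') (1 + j') ≤ pvAfold matrix - 2 := by
  by_cases hreg : ((1 + i' : Nat) : Int) ≤ (matrix.length : Int) - 3
      ∧ ((1 + j' : Nat) : Int) ≤ (matrix.length : Int) - 3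
  · rcases le_total i' j' with hij | hij
    · -- upper diagonal d = j' - i', position e = i'
      set d : Nat := j' - i' with hdd
      have hd : (d : Int) ≤ (matrix.length : Int) - 4 := by
        have := hreg.2; push_cast at this ⊢; omega
      have hmem : i' ∈ List.range ((matrix.length : Int) - d - 3).toNat := by
        refine List.mem_range.mpr ?_
        have := hreg.2; push_cast at this; omega
      have hstep : streak matrix (1 + i') (1 + j')
          ≤ (List.range ((matrix.length : Int) - d - 3).toNat).foldl
              (fun a e => max a (streak matrix (1 + e) (1 + d + e))) 0 := by
        refine mem_le_foldl (F := fun a e => max a (streak matrix (1 + e) (1 + d + e)))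
          (fun a e => le_max_left _ _) _ i' (fun a => ?_) _ 0 hmem
        show streak matrix (1 + i') (1 + j') ≤ max a (streak matrix (1 + i') (1 + d + i'))
        rw [show 1 + d + i' = 1 + j' from by omega]
        exact le_max_right _ _
      have h1 := searchSeq_eq matrix d hd
      have h2 := cur_le_Afold matrix d (by have := hreg.2; push_cast at this; omega)
      omega
    · -- lower diagonal d = i' - j', position e = j'
      set d : Nat := i' - j' with hdd
      have hd : (d : Int) ≤ (matrix.length : Int) - 4 := by
        have := hreg.1; push_cast at this ⊢; omega
      have hmem : j' ∈ List.range ((matrix.length : Int) - d - 3).toNat := by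
        refine List.mem_range.mpr ?_
        have := hreg.1; push_cast at this; omega
      have hstep : streak matrix (1 + i') (1 + j')
          ≤ (List.range ((matrix.length : Int) - d - 3).toNat).foldl
              (fun a e => max a (streak matrix (1 + d + e) (1 + e))) 0 := by
        refine mem_le_foldl (F := fun a e => max a (streak matrix (1 + d + e) (1 + e)))
          (fun a e => le_max_left _ _) _ j' (fun a => ?_) _ 0 hmem
        show streak matrix (1 + i') (1 + j') ≤ max a (streak matrix (1 + d + j') (1 + j'))
        rw [show 1 + d + j' = 1 + i' from by omega]
        exact le_max_right _ _
      have h1 := searchSeq_eq' matrix d hd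
      have h2 := cur_le_Afold matrix d (by have := hreg.1; push_cast at this; omega)
      omega
  · rw [streak_zero_outside matrix (1 + i') (1 + j') (by push_cast at hreg ⊢; omega)]
    have := two_le_Afold matrix; omega

lemma Afold_eq (matrix : List (List Int)) : pvAfold matrix = 2 + pvR matrix := by
  have hle : pvAfold matrix ≤ 2 + pvR matrix := by
    unfold pvAfold
    refine foldl_preserve _ _ _ 2 (by have := pvR_nonneg matrix; omega)
      (fun b k hb _ => ?_)
    have := cur_le matrix k; omega
  have hge : pvR matrix ≤ pvAfold matrix - 2 :=
    pvR_le matrix _ (by have := two_le_Afold matrix; omega) (streak_le_Afold matrix)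
  omega

lemma A_eq_R (matrix : List (List Int)) :
    longest_diagonal_geometric_subsequence matrix = pvRet (2 + pvR matrix) := by
  rw [A_eq_fold, Afold_eq]

-- ---- B side ----

lemma streakI_zero (matrix : List (List Int)) (j : Int) : streakI matrix 0 j = 0 := by
  unfold streakI
  split
  · simp [streak]
  · rfl

-- invariant of B's inner loop over one row
lemma inner_inv (matrix : List (List Int)) (i : Nat) (hi1 : 1 ≤ i)
    (hi2 : (i : Int) ≤ (matrix.length : Int) - 3)
    (prev : PySem.Dict Int Int)
    (hprev : ∀ j : Int, prev.getD j 0 = streakI matrix (i - 1) j) :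
    ∀ (m : Nat), (m : Int) ≤ (matrix.length : Int) - 3 → ∀ (b : Int), 0 ≤ b →
    (((List.range m).map (fun x : Nat => (1 : Int) + (x : Int))).foldl
        (pvInnerStep matrix prev (i : Int)) (b, PySem.Dict.empty)).1
      = (List.range m).foldl (fun a j' => max a (streak matrix i (1 + j'))) b
    ∧ ∀ j : Int,
      (((List.range m).map (fun x : Nat => (1 : Int) + (x : Int))).foldl
        (pvInnerStep matrix prev (i : Int)) (b, PySem.Dict.empty)).2.getD j 0
      = if 1 ≤ j ∧ j ≤ (m : Int) then streakI matrix i j else 0 := by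
  intro m
  induction m with
  | zero =>
    intro _ b hb
    refine ⟨rfl, fun j => ?_⟩
    rw [if_neg (by omega)]
    exact PySem.Dict.getD_empty _ _
  | succ m ih =>
    intro hm b hb
    obtain ⟨ih1, ih2⟩ := ih (by omega) b hb
    rw [List.range_succ, List.map_append, List.foldl_append] at *
    simp only [List.map_cons, List.map_nil, List.foldl_cons, List.foldl_nil] at *
    obtain ⟨i'', rfl⟩ : ∃ i'', i = i'' + 1 := ⟨i - 1, by omega⟩
    generalize hst : (((List.range m).map (fun x : Nat => (1 : Int) + (x : Int))).foldl
        (pvInnerStep matrix prev ((i'' + 1 : Nat) : Int)) (b, PySem.Dict.empty)) = st at ih1 ih2 ⊢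
    obtain ⟨bs, Ds⟩ := st
    simp only at ih1 ih2 ⊢
    have hb' : 0 ≤ bs := by
      rw [ih1]
      exact le_trans hb (le_foldl_incr _ (fun a j' => le_max_left _ _) _ b)
    have hpred : prev.getD ((1 : Int) + (m : Int) - 1) 0 = streak matrix i'' m := by
      rw [show (1 : Int) + (m : Int) - 1 = (m : Int) from by ring, hprev]
      unfold streakI
      rw [if_pos (by omega), Int.toNat_natCast]
      rfl
    have hsval : streak matrix (i'' + 1) (m + 1)
        = if pvTest matrix ((i'' : Int) + 1) ((m : Int) + 1) = true
          then streak matrix i'' m + 1 else 0 := by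
      rw [streak]
      by_cases ht : pvTest matrix ((i'' : Int) + 1) ((m : Int) + 1) = true
      · rw [if_pos ⟨⟨by push_cast at hi2 ⊢; omega, by omega⟩, ht⟩, if_pos ht]
      · rw [if_neg (fun h => ht h.2), if_neg ht]
    have hcond : (pvCellB matrix ((i'' + 1 : Nat) : Int) ((1 : Int) + (m : Int)) ^ 2
          = pvCellB matrix (((i'' + 1 : Nat) : Int) - 1) ((1 : Int) + (m : Int) - 1)
            * pvCellB matrix (((i'' + 1 : Nat) : Int) + 1) ((1 : Int) + (m : Int) + 1))
        ↔ pvTest matrix ((i'' : Int) + 1) ((m : Int) + 1) = true := by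
      unfold pvTest pvCellB pvCell
      rw [decide_eq_true_eq]
      constructor <;> intro h <;>
        [ (rw [show ((i'' : Int) + 1) = ((i'' + 1 : Nat) : Int) from by push_cast; ring,
              show ((m : Int) + 1) = (1 : Int) + (m : Int) from by ring]; exact h);
          (rw [show ((i'' + 1 : Nat) : Int) = ((i'' : Int) + 1) from by push_cast; ring,
              show (1 : Int) + (m : Int) = ((m : Int) + 1) from by ring]; exact h) ]
    constructor
    · -- best component
      show (pvInnerStep matrix prev ((i'' + 1 : Nat) : Int) (bs, Ds) ((1 : Int) + (m : Int))).1 = _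
      unfold pvInnerStep
      dsimp only
      by_cases hc : pvTest matrix ((i'' : Int) + 1) ((m : Int) + 1) = true
      · rw [if_pos (hcond.mpr hc)]
        show (if prev.getD ((1 : Int) + (m : Int) - 1) 0 + 1 > bs
              then prev.getD ((1 : Int) + (m : Int) - 1) 0 + 1 else bs) = _
        rw [if_gt_eq_max, hpred, ih1]
        have : streak matrix (i'' + 1) (1 + m) = streak matrix i'' m + 1 := by
          rw [show 1 + m = m + 1 from by omega, hsval, if_pos hc]
        rw [List.foldl_append, List.foldl_cons, List.foldl_nil, this]
      · rw [if_neg (fun h => hc (hcond.mp h))]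
        show bs = _
        have : streak matrix (i'' + 1) (1 + m) = 0 := by
          rw [show 1 + m = m + 1 from by omega, hsval, if_neg hc]
        rw [ih1, List.foldl_append, List.foldl_cons, List.foldl_nil, this]
        rw [ih1] at hb'
        omega
    · -- dict component
      intro j
      show ((pvInnerStep matrix prev ((i'' + 1 : Nat) : Int) (bs, Ds) ((1 : Int) + (m : Int))).2.getD j 0) = _
      unfold pvInnerStep
      dsimp only
      by_cases hc : pvTest matrix ((i'' : Int) + 1) ((m : Int) + 1) = true
      · rw [if_pos (hcond.mpr hc)]
        show (Ds.insert ((1 : Int) + (m : Int)) (prev.getD ((1 : Int) + (m : Int) - 1) 0 + 1)).getD j 0 = _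
        rw [PySem.Dict.getD_insert, hpred]
        by_cases hj : j = (1 : Int) + (m : Int)
        · rw [if_pos hj, if_pos (by omega)]
          unfold streakI
          rw [if_pos (by omega), show j.toNat = m + 1 from by omega,
            hsval, if_pos hc]
        · rw [if_neg hj, ih2]
          by_cases hj2 : 1 ≤ j ∧ j ≤ (m : Int)
          · rw [if_pos hj2, if_pos (by push_cast; omega)]
          · rw [if_neg hj2, if_neg (by push_cast; omega)]
      · rw [if_neg (fun h => hc (hcond.mp h))]
        show Ds.getD j 0 = _
        rw [ih2]
        by_cases hj2 : 1 ≤ j ∧ j ≤ (m : Int)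
        · rw [if_pos hj2, if_pos (by push_cast; omega)]
        · by_cases hj3 : j = (1 : Int) + (m : Int)
          · rw [if_neg hj2, if_pos (by omega)]
            unfold streakI
            rw [if_pos (by omega), show j.toNat = m + 1 from by omega,
              hsval, if_neg hc]
          · rw [if_neg hj2, if_neg (by push_cast; omega)]

-- invariant of B's outer loop over the rows
lemma outer_inv (matrix : List (List Int)) :
    ∀ (k : Nat), k ≤ pvK matrix →
    (((List.range k).map (fun x : Nat => (1 : Int) + (x : Int))).foldl
        (pvRowStep matrix) (0, PySem.Dict.empty)).1
      = (List.range k).foldl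
          (fun b i' => (List.range (pvK matrix)).foldl
            (fun a j' => max a (streak matrix (1 + i') (1 + j'))) b) 0
    ∧ ∀ j : Int,
      (((List.range k).map (fun x : Nat => (1 : Int) + (x : Int))).foldl
        (pvRowStep matrix) (0, PySem.Dict.empty)).2.getD j 0 = streakI matrix k j := by
  intro k
  induction k with
  | zero =>
    intro _
    refine ⟨rfl, fun j => ?_⟩
    rw [streakI_zero]
    exact PySem.Dict.getD_empty _ _
  | succ k ih =>
    intro hk
    obtain ⟨ih1, ih2⟩ := ih (by omega)
    rw [List.range_succ, List.map_append, List.foldl_append] at *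
    simp only [List.map_cons, List.map_nil, List.foldl_cons, List.foldl_nil] at *
    set st := (((List.range k).map (fun x : Nat => (1 : Int) + (x : Int))).foldl
        (pvRowStep matrix) (0, PySem.Dict.empty)) with hst
    have hb0 : 0 ≤ st.1 := by
      rw [ih1]
      exact le_foldl_incr _
        (fun b i' => le_foldl_incr _ (fun a j' => le_max_left _ _) _ b) _ 0
    have hrow : pvRowStep matrix st ((1 : Int) + (k : Int))
        = (((List.range (pvK matrix)).map (fun x : Nat => (1 : Int) + (x : Int))).foldl
            (pvInnerStep matrix st.2 ((k + 1 : Nat) : Int)) (st.1, PySem.Dict.empty)) := by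
      unfold pvRowStep
      rw [PySem.List.pyRange_one 1 ((matrix.length : Int) - 2),
        show ((matrix.length : Int) - 2 - 1).toNat = pvK matrix from by unfold pvK; omega,
        show ((1 : Int) + (k : Int)) = ((k + 1 : Nat) : Int) from by push_cast; ring]
    have hinner := inner_inv matrix (k + 1) (by omega)
      (by unfold pvK at hk; push_cast; omega) st.2
      (fun j => by rw [show k + 1 - 1 = k from rfl, ih2])
      (pvK matrix) (by unfold pvK at hk ⊢; omega) st.1 hb0
    constructor
    · rw [hrow, hinner.1, ih1]
      have hfun : (fun (a : Int) (j' : Nat) => max a (streak matrix (k + 1) (1 + j')))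
          = (fun (a : Int) (j' : Nat) => max a (streak matrix (1 + k) (1 + j'))) := by
        funext a j'; congr 2; omega
      rw [hfun, List.foldl_append, List.foldl_cons, List.foldl_nil]
    · intro j
      rw [hrow, hinner.2]
      by_cases hj : 1 ≤ j ∧ j ≤ ((pvK matrix : Nat) : Int)
      · rw [if_pos hj]
      · rw [if_neg hj]
        unfold streakI
        by_cases hj0 : 0 ≤ j
        · rw [if_pos hj0]
          rw [streak_zero_outside]
          intro ⟨h1, h2, h3, h4⟩
          unfold pvK at hj
          omega
        · rw [if_neg hj0]

lemma B_eq_R (matrix : List (List Int)) :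
    longest_diagonal_geometric_subsequence_alt matrix = pvRet (2 + pvR matrix) := by
  unfold longest_diagonal_geometric_subsequence_alt
  rw [PySem.List.pyRange_one 1 ((matrix.length : Int) - 2),
    show ((matrix.length : Int) - 2 - 1).toNat = pvK matrix from by unfold pvK; omega]
  have h := (outer_inv matrix (pvK matrix) (le_refl _)).1
  dsimp only
  rw [h]
  have hR : (List.range (pvK matrix)).foldl
      (fun b i' => (List.range (pvK matrix)).foldl
        (fun a j' => max a (streak matrix (1 + i') (1 + j'))) b) 0 = pvR matrix := rfl
  rw [hR]
  have h0 := pvR_nonneg matrix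
  unfold pvRet
  split_ifs <;> omega

-- ===== VERDICT (by name: the statement is the Claim_ definition above) =====
theorem longest_diagonal_geometric_subsequence_spec : Claim_equal_longest_diagonal_geometric_subsequence := by
  intro matrix _ _
  unfold Spec_longest_diagonal_geometric_subsequence
  rw [A_eq_R, B_eq_R]
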